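-- pv_equiv track=rewrite | github.com/dev7796/Othello_Game | mp520.py | hor_right
-- ===== SOURCE A (Python) =====
-- def hor_right(state, player, cr, cc):
--     tr = len(state)
--     tc = len(state[0])
--     bpos = -1
--     for i in range(cc+1, tc):
--         if state[cr][i] == ' ':
--             break
--         if state[cr][i] == player:
--             bpos = i
--             break
--     if bpos != -1:
--         return abs(bpos-cc)-1
--     else:
--         return 0
-- ===== SOURCE B (Python) =====
-- def hor_right(state, player, cr, cc):
--     tc = len(state[0])
--     if cc + 1 >= tc:
--         return 0
--     rest = state[cr][cc+1:tc]
--     p = rest.index(player) if player in rest else None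
--     s = rest.index(' ') if ' ' in rest else None
--     if p is not None and (s is None or p < s):
--         return p
--     return 0
-- ===== Notes on version B (the rewrite author's own statement) =====
-- stated objective: idiomatic
-- what changed: Replaces the index-driven early-break scan with sentinel bpos by an early 'nothing to the right' return, one slice of the row, and a comparison of the positions of the first `player` and first blank found with list.index lookups.
-- outside the precondition, e.g. on hor_right([['x', 'y']], 'x', 0, -2): A returns 1, B returns 0; on hor_right([['x', 'y', 'z'], ['x']], 'x', 1, -1): A returns 0, B returns 0; on hor_right([['x', 'y'], ['x']], 'y', 1, 0): A raises IndexError, B returns 0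
import Mathlib
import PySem

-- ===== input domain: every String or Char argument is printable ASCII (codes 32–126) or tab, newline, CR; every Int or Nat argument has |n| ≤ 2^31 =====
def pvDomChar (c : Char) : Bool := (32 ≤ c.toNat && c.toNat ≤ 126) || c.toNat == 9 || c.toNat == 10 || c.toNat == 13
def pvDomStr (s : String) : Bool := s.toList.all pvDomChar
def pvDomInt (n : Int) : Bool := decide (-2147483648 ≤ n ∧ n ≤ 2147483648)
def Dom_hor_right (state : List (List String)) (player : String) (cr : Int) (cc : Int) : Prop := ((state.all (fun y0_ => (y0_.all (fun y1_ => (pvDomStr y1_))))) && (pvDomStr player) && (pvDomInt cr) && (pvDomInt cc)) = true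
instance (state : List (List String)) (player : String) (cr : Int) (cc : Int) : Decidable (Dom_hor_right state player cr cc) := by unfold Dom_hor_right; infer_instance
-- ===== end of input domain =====

-- B replaces A's index-driven early-break scan (sentinel bpos) with an early
-- 'nothing to the right' return, one slice of the row and a position comparison
-- of the first `player` and first blank (objective: idiomatic).

-- ===== PORT A =====
def hor_right_loopA (row : List String) (player : String) : List Int → Int
  | [] => -1
  | i :: is =>
    match PySem.List.pyGet? row i with
    | none => -1   -- Python raises IndexError here; outside Pre_
    | some c =>
      if c = " " then -1
      else if c = player then i
      else hor_right_loopA row player is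

def hor_right (state : List (List String)) (player : String) (cr : Int) (cc : Int) : Int :=
  let tc : Int := ((PySem.List.pyGet? state 0).getD []).length   -- state[0] raises on []; outside Pre_
  let row : List String := (PySem.List.pyGet? state cr).getD []
  let bpos : Int := hor_right_loopA row player (PySem.List.pyRange (cc + 1) tc 1)
  if bpos ≠ -1 then |bpos - cc| - 1 else 0

-- ===== PORT B =====
def hor_right_alt (state : List (List String)) (player : String) (cr : Int) (cc : Int) : Int :=
  let tc : Int := ((PySem.List.pyGet? state 0).getD []).length   -- state[0] raises on []; outside Pre_
  if cc + 1 ≥ tc then 0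
  else
    let rest := PySem.List.slice ((PySem.List.pyGet? state cr).getD []) (some (cc + 1)) (some tc)
    match PySem.List.index? rest player, PySem.List.index? rest " " with
    | some p, none => (p : Int)
    | some p, some s => if p < s then (p : Int) else 0
    | none, _ => 0

-- ===== PRECONDITION & SPEC =====
-- Pre_ excludes empty boards (A raises IndexError on state[0]), cc ≤ -2, where
-- A's scan starts at a Python negative-wraparound index — an accident of the
-- implementation no caller relies on — and, when the scanned range is nonempty,
-- out-of-range cr and rows shorter than row 0, where A raises IndexError unless
-- it happens to break first.
def Pre_hor_right (state : List (List String)) (player : String) (cr : Int) (cc : Int) : Prop :=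
  state ≠ [] ∧ -1 ≤ cc ∧
    (((state.headD []).length : Int) ≤ cc + 1 ∨
      (PySem.Raise.InRange state.length cr ∧
        (state.headD []).length ≤ ((PySem.List.pyGet? state cr).getD []).length))

instance (state : List (List String)) (player : String) (cr : Int) (cc : Int) : Decidable (Pre_hor_right state player cr cc) := by unfold Pre_hor_right; infer_instance

def pvWitness_hor_right : List (List String) × String × Int × Int :=
  ([["b", "w", "w", "b"]], "b", 0, 0)

def Spec_hor_right (state : List (List String)) (player : String) (cr : Int) (cc : Int) (out : Int) : Prop := out = hor_right_alt state player cr cc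
instance (state : List (List String)) (player : String) (cr : Int) (cc : Int) (out : Int) : Decidable (Spec_hor_right state player cr cc out) := by unfold Spec_hor_right; infer_instance

-- ===== CLAIM (what is proved, stated in full; the proofs are below) =====
def Claim_equal_hor_right : Prop := ∀ (state : List (List String)) (player : String) (cr : Int) (cc : Int), Dom_hor_right state player cr cc → Pre_hor_right state player cr cc → Spec_hor_right state player cr cc (hor_right state player cr cc)

-- ===== LEMMAS AND PROOFS =====

-- first index of `player` strictly before any blank, on a row segment
def pvScan (player : String) : List String → Option Nat
  | [] => none
  | c :: t =>
    if c = " " then none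
    else if c = player then some 0
    else (pvScan player t).map (· + 1)

lemma scan_eq_index? (player : String) (l : List String) :
    pvScan player l =
      (match PySem.List.index? l player, PySem.List.index? l " " with
        | some p, none => some p
        | some p, some s => if p < s then some p else none
        | none, _ => none) := by
  induction l with
  | nil => simp [pvScan, PySem.List.index?_eq_idxOf?]
  | cons c t ih =>
    rw [pvScan]
    by_cases hb : c = " " <;> by_cases hp : c = player
    · subst hb; subst hp
      rw [PySem.List.index?_cons_self]
      simp
    · subst hb
      rw [PySem.List.index?_cons_of_ne t hp, PySem.List.index?_cons_self]
      cases PySem.List.index? t player <;> simp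
    · subst hp
      rw [PySem.List.index?_cons_self, PySem.List.index?_cons_of_ne t hb]
      simp only [if_neg hb]
      cases PySem.List.index? t " " <;> simp
    · rw [PySem.List.index?_cons_of_ne t hp, PySem.List.index?_cons_of_ne t hb, ih]
      simp only [if_neg hb, if_neg hp]
      cases PySem.List.index? t player <;> cases PySem.List.index? t " " <;> simp

lemma alt_match_eq_scan (player : String) (l : List String) :
    (match PySem.List.index? l player, PySem.List.index? l " " with
      | some p, none => (p : Int)
      | some p, some s => if p < s then (p : Int) else 0
      | none, _ => 0) =
    (match pvScan player l with | none => 0 | some j => (j : Int)) := by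
  rw [scan_eq_index?]
  cases PySem.List.index? l player <;> cases PySem.List.index? l " " <;> simp
  split_ifs <;> simp

lemma loopA_eq_scan (row : List String) (player : String) :
    ∀ (k n t : Nat), t ≤ row.length → t - n = k →
    hor_right_loopA row player (PySem.List.pyRange (n : Int) (t : Int) 1) =
      (match pvScan player ((row.drop n).take (t - n)) with
        | none => -1
        | some j => ((n + j : Nat) : Int)) := by
  intro k
  induction k with
  | zero =>
    intro n t _ h
    have hle : t ≤ n := by omega
    rw [PySem.List.pyRange_one_eq_nil (by exact_mod_cast hle)]
    have : t - n = 0 := by omega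
    rw [this, List.take_zero]
    rfl
  | succ k ih =>
    intro n t htlen h
    have hn : n < t := by omega
    have hnrow : n < row.length := by omega
    rw [PySem.List.pyRange_one_cons (by exact_mod_cast hn)]
    have hseg : (row.drop n).take (t - n)
        = row[n] :: (row.drop (n + 1)).take (t - (n + 1)) := by
      rw [List.drop_eq_getElem_cons hnrow]
      have : t - n = (t - (n + 1)) + 1 := by omega
      rw [this, List.take_succ_cons]
    rw [hseg, hor_right_loopA, PySem.List.pyGet?_ofNat row n hnrow]
    by_cases hb : row[n] = " "
    · simp [pvScan, hb]
    · by_cases hp : row[n] = player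
      · have hps : ¬ player = " " := by rw [← hp]; exact hb
        simp [pvScan, hp, hps]
      · have hcast : (n : Int) + 1 = ((n + 1 : Nat) : Int) := by push_cast; ring
        rw [pvScan]
        simp only [if_neg hb, if_neg hp, hcast]
        rw [ih (n + 1) t htlen (by omega)]
        cases hz : pvScan player ((row.drop (n + 1)).take (t - (n + 1))) <;> simp
        ring

-- ===== VERDICT (by name: the statement is the Claim_ definition above) =====
theorem hor_right_spec : Claim_equal_hor_right := by
  intro state player cr cc _ hpre
  obtain ⟨hne, hcc1, hmain⟩ := hpre
  unfold Spec_hor_right hor_right hor_right_alt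
  set tc : Int := (((PySem.List.pyGet? state 0).getD []).length : Int) with htcdef
  set row : List String := (PySem.List.pyGet? state cr).getD [] with hrowdef
  by_cases hguard : cc + 1 ≥ tc
  · -- nothing to the right: A's range is empty, B's guard fires
    rw [if_pos hguard]
    show (if hor_right_loopA row player (PySem.List.pyRange (cc + 1) tc 1) ≠ -1 then
        |hor_right_loopA row player (PySem.List.pyRange (cc + 1) tc 1) - cc| - 1 else 0) = 0
    rw [PySem.List.pyRange_one_eq_nil hguard]
    simp [hor_right_loopA]
  · -- nonempty range: Pre_'s second disjunct holds
    have hhead : ((PySem.List.pyGet? state 0).getD []) = state.headD [] := by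
      cases state with
      | nil => exact absurd rfl hne
      | cons r0 rs => rw [PySem.List.pyGet?_zero]; rfl
    have hlenrow : tc.toNat ≤ row.length := by
      rcases hmain with h1 | ⟨_, h2⟩
      · exfalso
        rw [htcdef, hhead] at hguard
        exact hguard h1
      · rw [htcdef, hhead]
        simpa using h2
    rw [if_neg hguard]
    show (if hor_right_loopA row player (PySem.List.pyRange (cc + 1) tc 1) ≠ -1 then
        |hor_right_loopA row player (PySem.List.pyRange (cc + 1) tc 1) - cc| - 1 else 0) =
      (match PySem.List.index? (PySem.List.slice row (some (cc + 1)) (some tc)) player,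
             PySem.List.index? (PySem.List.slice row (some (cc + 1)) (some tc)) " " with
        | some p, none => (p : Int)
        | some p, some s => if p < s then (p : Int) else 0
        | none, _ => 0)
    have hcc : cc + 1 = (((cc + 1).toNat : Nat) : Int) := by omega
    have htcn : tc = ((tc.toNat : Nat) : Int) := by
      rw [htcdef]; simp
    rw [hcc, htcn]
    have hslice : PySem.List.slice row (some (((cc + 1).toNat : Nat) : Int))
        (some ((tc.toNat : Nat) : Int))
        = (row.drop (cc + 1).toNat).take (tc.toNat - (cc + 1).toNat) :=
      PySem.List.slice_natCast ..
    rw [hslice,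
      loopA_eq_scan row player (tc.toNat - (cc + 1).toNat) (cc + 1).toNat tc.toNat
        hlenrow rfl,
      alt_match_eq_scan player ((row.drop (cc + 1).toNat).take (tc.toNat - (cc + 1).toNat))]
    cases hz : pvScan player ((row.drop (cc + 1).toNat).take (tc.toNat - (cc + 1).toNat)) with
    | none => simp
    | some j =>
      simp only []
      have h1 : (((cc + 1).toNat + j : Nat) : Int) ≠ -1 := by omega
      rw [if_pos h1]
      have h2 : (((cc + 1).toNat + j : Nat) : Int) - cc = 1 + j := by omega
      rw [h2, abs_of_nonneg (by positivity)]
      omega
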